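-- pv_equiv track=rewrite | github.com/joeamansfield/BIO364 | GibbsSampler.py | ScoreMotif
-- ===== SOURCE A (Python) =====
-- def ScoreMotif(motifs):
--     score = 0
--     numMotifs = len(motifs)
--     length = len(motifs[0])
--     count = [None] * 4
--     for i in range(4):
--         count[i] = [0] * length
--     for motif in motifs:
--         for i in range(length):
--             base = motif[i]
--             match base:
--                 case 'A':
--                     count[0][i] += 1
--                 case 'C':
--                     count[1][i] += 1
--                 case 'G':
--                     count[2][i] += 1
--                 case 'T':
--                     count[3][i] += 1
--     for i in range(length):
--         column = []
--         for j in range(4):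
--             column.append(count[j][i])
--         score = score + numMotifs - max(column)
--     return score
-- ===== SOURCE B (Python) =====
-- def ScoreMotif(motifs):
--     numMotifs = len(motifs)
--     length = len(motifs[0])
--     score = 0
--     for i in range(length):
--         best = max(sum(1 for m in motifs if m[i] == b) for b in 'ACGT')
--         score += numMotifs - best
--     return score
-- ===== Notes on version B (the rewrite author's own statement) =====
-- stated objective: simpler
-- what changed: Drops the persistent 4xL count table: B walks the matrix column by column, counting each base on the fly and fusing counting with scoring in one pass per column.
import Mathlib
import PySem

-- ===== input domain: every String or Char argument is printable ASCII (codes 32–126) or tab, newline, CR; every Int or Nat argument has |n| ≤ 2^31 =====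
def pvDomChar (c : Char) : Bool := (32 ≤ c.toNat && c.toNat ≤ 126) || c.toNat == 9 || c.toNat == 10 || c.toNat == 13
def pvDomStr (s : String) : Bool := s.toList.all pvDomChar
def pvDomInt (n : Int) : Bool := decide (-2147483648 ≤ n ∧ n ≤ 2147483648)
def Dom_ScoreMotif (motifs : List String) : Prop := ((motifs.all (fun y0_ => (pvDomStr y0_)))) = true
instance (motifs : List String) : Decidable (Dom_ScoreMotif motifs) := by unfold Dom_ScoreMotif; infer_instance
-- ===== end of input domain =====

-- B replaces A's persistent 4×L count table by a single column-major pass that counts and scores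
-- each column on the fly (objective: simpler). Return-value equivalence on Pre_ (where A returns).

-- ===== PORT A =====
-- count[b][i] += 1 : in-place list assignment at a valid index
def rowInc (row : List Int) (i : Nat) : List Int := row.set i (row.getD i 0 + 1)

def ScoreMotif (motifs : List String) : Int :=
  let numMotifs : Int := motifs.length
  -- len(motifs[0]); the empty list (IndexError) is excluded by Pre_
  let length := (motifs.headD "").length
  -- count = 4 rows of `length` zeros
  let init : List Int × List Int × List Int × List Int :=
    (List.replicate length 0, List.replicate length 0, List.replicate length 0, List.replicate length 0)
  let cnt := motifs.foldl (fun c motif =>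
    (List.range length).foldl (fun c (i : Nat) =>
      -- base = motif[i]; an out-of-range i (IndexError) is excluded by Pre_, and the
      -- wildcard branch is Python's match falling through on a non-ACGT base
      match PySem.Str.pyGet? motif (i : Int) with
      | some 'A' => (rowInc c.1 i, c.2.1, c.2.2.1, c.2.2.2)
      | some 'C' => (c.1, rowInc c.2.1 i, c.2.2.1, c.2.2.2)
      | some 'G' => (c.1, c.2.1, rowInc c.2.2.1 i, c.2.2.2)
      | some 'T' => (c.1, c.2.1, c.2.2.1, rowInc c.2.2.2 i)
      | _ => c) c) init
  (List.range length).foldl (fun score i =>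
    -- column = [count[j][i] for j in range(4)] (the j-loop over the tuple's four rows, unrolled)
    let column : List Int := [cnt.1.getD i 0, cnt.2.1.getD i 0, cnt.2.2.1.getD i 0, cnt.2.2.2.getD i 0]
    match PySem.List.max? column (fun x => x) with  -- max(column); column is never empty
    | some m => score + numMotifs - m
    | none => score) 0

-- ===== PORT B =====
-- sum(1 for m in motifs if m[i] == b)
def colCount (motifs : List String) (i : Nat) (b : Char) : Int :=
  motifs.foldl (fun acc m => if PySem.Str.pyGet? m (i : Int) = some b then acc + 1 else acc) 0

def ScoreMotif_alt (motifs : List String) : Int :=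
  let numMotifs : Int := motifs.length
  -- len(motifs[0]); the empty list (IndexError) is excluded by Pre_
  let length := (motifs.headD "").length
  (List.range length).foldl (fun score i =>
    -- best = max over the generator for b in 'ACGT' (a running max over four values)
    let best := max (max (max (colCount motifs i 'A') (colCount motifs i 'C'))
                      (colCount motifs i 'G')) (colCount motifs i 'T')
    score + (numMotifs - best)) 0

-- ===== PRECONDITION & SPEC =====
-- Pre_ excludes exactly the inputs on which Python A raises IndexError: the empty list
-- (motifs[0]) and matrices in which some motif is shorter than the first one (motif[i]).
def Pre_ScoreMotif (motifs : List String) : Prop :=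
  motifs ≠ [] ∧ ∀ m ∈ motifs, (motifs.headD "").length ≤ m.length
instance (motifs : List String) : Decidable (Pre_ScoreMotif motifs) := by
  unfold Pre_ScoreMotif; infer_instance

def pvWitness_ScoreMotif : List String := ["ACGT", "AAGN"]

def Spec_ScoreMotif (motifs : List String) (out : Int) : Prop := out = ScoreMotif_alt motifs
instance (motifs : List String) (out : Int) : Decidable (Spec_ScoreMotif motifs out) := by
  unfold Spec_ScoreMotif; infer_instance

-- ===== CLAIM (what is proved, stated in full; the proofs are below) =====
def Claim_equal_ScoreMotif : Prop := ∀ (motifs : List String), Dom_ScoreMotif motifs → Pre_ScoreMotif motifs → Spec_ScoreMotif motifs (ScoreMotif motifs)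

-- ===== LEMMAS AND PROOFS =====

theorem rowInc_length (row : List Int) (i : Nat) : (rowInc row i).length = row.length := by
  simp [rowInc]

theorem rowInc_getD_ne (row : List Int) (i j : Nat) (h : j ≠ i) :
    (rowInc row i).getD j 0 = row.getD j 0 := by
  simp [rowInc, List.getD, List.getElem?_set_ne (Ne.symm h)]

theorem rowInc_getD_self (row : List Int) (i : Nat) (h : i < row.length) :
    (rowInc row i).getD i 0 = row.getD i 0 + 1 := by
  simp [rowInc, List.getD, List.getElem?_set_self h, List.getElem?_eq_getElem h]

-- the per-base column bump: one motif's contribution to one row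
def bump (L : Nat) (motif : String) (b : Char) (row : List Int) : List Int :=
  (List.range L).foldl (fun r (j : Nat) => if PySem.Str.pyGet? motif (j : Int) = some b then rowInc r j else r) row

theorem bump_succ (L : Nat) (motif : String) (b : Char) (row : List Int) :
    bump (L + 1) motif b row
      = if PySem.Str.pyGet? motif (L : Int) = some b then rowInc (bump L motif b row) L
        else bump L motif b row := by
  rw [bump, bump, List.range_succ, List.foldl_append, List.foldl_cons, List.foldl_nil]

theorem bump_length (L : Nat) (motif : String) (b : Char) (row : List Int) :
    (bump L motif b row).length = row.length := by
  induction L with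
  | zero => rfl
  | succ L ih =>
      rw [bump_succ]
      split
      · rw [rowInc_length]; exact ih
      · exact ih

theorem bump_getD_ge (L : Nat) (motif : String) (b : Char) (row : List Int) (i : Nat)
    (h : L ≤ i) : (bump L motif b row).getD i 0 = row.getD i 0 := by
  induction L with
  | zero => rfl
  | succ L ih =>
      rw [bump_succ]
      have ih' := ih (by omega)
      split
      · rw [rowInc_getD_ne _ _ _ (by omega)]; exact ih'
      · exact ih'

theorem bump_getD_lt (L : Nat) (motif : String) (b : Char) (row : List Int) (i : Nat)
    (hi : i < L) (hlen : i < row.length) :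
    (bump L motif b row).getD i 0
      = row.getD i 0 + (if PySem.Str.pyGet? motif (i : Int) = some b then 1 else 0) := by
  induction L with
  | zero => omega
  | succ L ih =>
      rw [bump_succ]
      by_cases hiL : i = L
      · subst hiL
        have hlen' : i < (bump i motif b row).length := by rw [bump_length]; exact hlen
        have hge := bump_getD_ge i motif b row i le_rfl
        split
        · rw [rowInc_getD_self _ _ hlen', hge]
        · rw [hge]; omega
      · have ih' := ih (by omega)
        split
        · rw [rowInc_getD_ne _ _ _ hiL]; exact ih'
        · exact ih'

-- B's column count, starting from an arbitrary accumulator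
theorem colCount_from (motifs : List String) (i : Nat) (b : Char) (acc : Int) :
    motifs.foldl (fun acc m => if PySem.Str.pyGet? m (i : Int) = some b then acc + 1 else acc) acc
      = acc + colCount motifs i b := by
  induction motifs generalizing acc with
  | nil => simp [colCount]
  | cons m ms ih =>
      rw [colCount, List.foldl_cons, List.foldl_cons, ih, ih]
      split <;> ring

-- A's inner (per-motif) fold factors into four independent row bumps
theorem motifStep_eq_bump (L : Nat) (motif : String)
    (c : List Int × List Int × List Int × List Int) :
    (List.range L).foldl (fun c (i : Nat) =>
      match PySem.Str.pyGet? motif (i : Int) with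
      | some 'A' => (rowInc c.1 i, c.2.1, c.2.2.1, c.2.2.2)
      | some 'C' => (c.1, rowInc c.2.1 i, c.2.2.1, c.2.2.2)
      | some 'G' => (c.1, c.2.1, rowInc c.2.2.1 i, c.2.2.2)
      | some 'T' => (c.1, c.2.1, c.2.2.1, rowInc c.2.2.2 i)
      | _ => c) c
    = (bump L motif 'A' c.1, bump L motif 'C' c.2.1, bump L motif 'G' c.2.2.1, bump L motif 'T' c.2.2.2) := by
  induction L generalizing c with
  | zero => rfl
  | succ L ih =>
      rw [List.range_succ, List.foldl_append, List.foldl_cons, List.foldl_nil, ih,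
          bump_succ, bump_succ, bump_succ, bump_succ]
      rcases h : PySem.Str.pyGet? motif (L : Int) with _ | ch
      · simp
      · by_cases hA : ch = 'A'
        · subst hA; simp
        · by_cases hC : ch = 'C'
          · subst hC; simp
          · by_cases hG : ch = 'G'
            · subst hG; simp
            · by_cases hT : ch = 'T'
              · subst hT; simp
              · split <;> simp_all

-- a fold whose step acts componentwise on a 4-tuple splits into four folds
theorem foldl_prod4 {α : Type} (l : List α) (f1 f2 f3 f4 : List Int → α → List Int)
    (c : List Int × List Int × List Int × List Int) :
    l.foldl (fun c x => (f1 c.1 x, f2 c.2.1 x, f3 c.2.2.1 x, f4 c.2.2.2 x)) c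
      = (l.foldl f1 c.1, l.foldl f2 c.2.1, l.foldl f3 c.2.2.1, l.foldl f4 c.2.2.2) := by
  induction l generalizing c with
  | nil => rfl
  | cons x xs ih => rw [List.foldl_cons]; exact ih _

theorem colCount_cons (m : String) (ms : List String) (i : Nat) (b : Char) :
    colCount (m :: ms) i b
      = (if PySem.Str.pyGet? m (i : Int) = some b then (1:Int) else 0) + colCount ms i b := by
  conv_lhs => rw [colCount]
  rw [List.foldl_cons, colCount_from]
  split <;> ring

-- folding the row bumps over the motif list yields B's column counts
theorem rowFold_getD (b : Char) (L : Nat) (i : Nat) (hi : i < L)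
    (motifs : List String) (row : List Int) (hlen : row.length = L) :
    (motifs.foldl (fun r m => bump L m b r) row).getD i 0
      = row.getD i 0 + colCount motifs i b := by
  induction motifs generalizing row with
  | nil => simp [colCount]
  | cons m ms ih =>
      rw [List.foldl_cons, ih (bump L m b row) (by rw [bump_length, hlen]),
          bump_getD_lt L m b row i hi (by omega), colCount_cons]
      split <;> ring

-- A's whole count table, row by row
theorem cntA_eq (motifs : List String) (L : Nat) :
    motifs.foldl (fun c motif =>
      (List.range L).foldl (fun c (i : Nat) =>
        match PySem.Str.pyGet? motif (i : Int) with
        | some 'A' => (rowInc c.1 i, c.2.1, c.2.2.1, c.2.2.2)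
        | some 'C' => (c.1, rowInc c.2.1 i, c.2.2.1, c.2.2.2)
        | some 'G' => (c.1, c.2.1, rowInc c.2.2.1 i, c.2.2.2)
        | some 'T' => (c.1, c.2.1, c.2.2.1, rowInc c.2.2.2 i)
        | _ => c) c)
      (List.replicate L (0:Int), List.replicate L (0:Int), List.replicate L (0:Int), List.replicate L (0:Int))
    = (motifs.foldl (fun r m => bump L m 'A' r) (List.replicate L 0),
       motifs.foldl (fun r m => bump L m 'C' r) (List.replicate L 0),
       motifs.foldl (fun r m => bump L m 'G' r) (List.replicate L 0),
       motifs.foldl (fun r m => bump L m 'T' r) (List.replicate L 0)) := by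
  refine Eq.trans (PySem.List.foldl_congr_mem _ _ _ _ ?_) (foldl_prod4 motifs _ _ _ _ _)
  intro c m _
  exact motifStep_eq_bump L m c

theorem cntRow_getD (b : Char) (L : Nat) (i : Nat) (hi : i < L) (motifs : List String) :
    (motifs.foldl (fun r m => bump L m b r) (List.replicate L (0:Int))).getD i 0
      = colCount motifs i b := by
  rw [rowFold_getD b L i hi motifs _ (List.length_replicate)]
  simp [List.getD]

theorem max4_eq (a b c d : Int) :
    PySem.List.max? [a, b, c, d] (fun x => x) = some (max (max (max a b) c) d) := by
  rw [PySem.List.max?_id_cons]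
  simp [List.foldl]

theorem score_eq (motifs : List String) : ScoreMotif motifs = ScoreMotif_alt motifs := by
  simp only [ScoreMotif, ScoreMotif_alt]
  rw [cntA_eq]
  refine PySem.List.foldl_congr_mem _ _ _ _ ?_
  intro score i hi
  have hi' : i < (motifs.headD "").length := List.mem_range.mp hi
  dsimp only
  rw [cntRow_getD _ _ _ hi', cntRow_getD _ _ _ hi', cntRow_getD _ _ _ hi', cntRow_getD _ _ _ hi',
      max4_eq]
  ring

-- ===== VERDICT (by name: the statement is the Claim_ definition above) =====
theorem ScoreMotif_spec : Claim_equal_ScoreMotif := by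
  intro motifs _ _
  unfold Spec_ScoreMotif
  exact score_eq motifs
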